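-- pv_equiv track=rewrite | github.com/JuliCai/TextScratch | convert.py | split_scripts
-- ===== SOURCE A (Python) =====
-- from typing import Any, Dict, List, Optional, Tuple
--
-- def split_scripts(content: str) -> List[List[Tuple[int, str]]]:
--     scripts: List[List[Tuple[int, str]]] = []
--     current: List[Tuple[int, str]] = []
--     for raw_line in content.splitlines():
--         if not raw_line.strip():
--             if current:
--                 scripts.append(current)
--                 current = []
--             continue
--         indent_spaces = len(raw_line) - len(raw_line.lstrip(" "))
--         indent_level = indent_spaces // 4
--         current.append((indent_level, raw_line.strip()))
--     if current:
--         scripts.append(current)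
--     return scripts
-- ===== SOURCE B (Python) =====
-- from typing import List, Tuple
--
-- def split_scripts(content: str) -> List[List[Tuple[int, str]]]:
--     lines = content.splitlines()
--     blank = [i for i, l in enumerate(lines) if not l.strip()]
--     bounds = [-1] + blank + [len(lines)]
--     scripts: List[List[Tuple[int, str]]] = []
--     for lo, hi in zip(bounds, bounds[1:]):
--         seg = lines[lo + 1:hi]
--         if seg:
--             scripts.append([((len(l) - len(l.lstrip(" "))) // 4, l.strip()) for l in seg])
--     return scripts
-- ===== Notes on version B (the rewrite author's own statement) =====
-- stated objective: alternative
-- what changed: A's streaming accumulate-current-and-flush-on-blank state machine is replaced by a staged index-based computation: first collect the positions of blank lines, make boundary list [-1]+blank+[len], then slice the line list between each pair of consecutive boundaries and keep the non-empty slices; no per-line accumulator state exists.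
import Mathlib
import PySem

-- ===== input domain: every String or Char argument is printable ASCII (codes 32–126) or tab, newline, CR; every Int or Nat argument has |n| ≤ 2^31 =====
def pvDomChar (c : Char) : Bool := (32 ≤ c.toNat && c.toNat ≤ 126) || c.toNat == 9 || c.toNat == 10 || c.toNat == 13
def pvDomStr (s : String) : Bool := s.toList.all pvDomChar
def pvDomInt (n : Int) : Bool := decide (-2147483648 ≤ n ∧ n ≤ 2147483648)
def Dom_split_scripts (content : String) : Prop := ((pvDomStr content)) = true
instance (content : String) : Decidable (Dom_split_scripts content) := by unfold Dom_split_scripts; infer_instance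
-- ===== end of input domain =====

-- B replaces A's streaming accumulate-and-flush state machine by a staged, index-based
-- computation: first the list of blank-line positions, then slicing the line list between
-- consecutive boundaries (objective: alternative).

-- ===== PORT A =====
-- lstrip(" ") removes leading ' ' characters only: exact as dropWhile (· == ' ')
def split_scripts (content : String) : List (List (Int × String)) :=
  let r := (PySem.Str.splitlines content).foldl
    (fun (st : List (List (Int × String)) × List (Int × String)) raw_line =>
      if PySem.Str.strip raw_line = "" then
        if st.2 ≠ [] then (st.1 ++ [st.2], ([] : List (Int × String))) else st
      else
        let indent_spaces : Int :=
          PySem.Str.len raw_line - ((raw_line.toList.dropWhile (· == ' ')).length : Int)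
        let indent_level := PySem.Int.floordiv indent_spaces 4
        (st.1, st.2 ++ [(indent_level, PySem.Str.strip raw_line)]))
    ([], [])
  if r.2 ≠ [] then r.1 ++ [r.2] else r.1

-- ===== PORT B =====
-- B's comprehension body: ((len(l) - len(l.lstrip(" "))) // 4, l.strip())
def pvLineEntry (l : String) : Int × String :=
  (PySem.Int.floordiv
     (PySem.Str.len l - ((l.toList.dropWhile (· == ' ')).length : Int)) 4,
   PySem.Str.strip l)

def split_scripts_alt (content : String) : List (List (Int × String)) :=
  let lines := PySem.Str.splitlines content
  -- blank = [i for i, l in enumerate(lines) if not l.strip()]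
  let blank : List Int :=
    (PySem.List.enumerate lines 0).filterMap
      (fun p => if PySem.Str.strip p.2 = "" then some p.1 else none)
  -- bounds = [-1] + blank + [len(lines)]
  let bounds : List Int := -1 :: blank ++ [(lines.length : Int)]
  -- for lo, hi in zip(bounds, bounds[1:]): append the slice if non-empty
  (bounds.zip (PySem.List.slice bounds (some 1) none)).foldl
    (fun acc p =>
      let seg := PySem.List.slice lines (some (p.1 + 1)) (some p.2)
      if seg ≠ [] then acc ++ [seg.map pvLineEntry] else acc) []

-- ===== PRECONDITION & SPEC =====
def Spec_split_scripts (content : String) (out : List (List (Int × String))) : Prop := out = split_scripts_alt content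
instance (content : String) (out : List (List (Int × String))) : Decidable (Spec_split_scripts content out) := by unfold Spec_split_scripts; infer_instance

-- ===== CLAIM (what is proved, stated in full; the proofs are below) =====
def Claim_equal_split_scripts : Prop := ∀ (content : String), Dom_split_scripts content → Spec_split_scripts content (split_scripts content)

-- ===== LEMMAS AND PROOFS =====

-- blankness test shared by the reasoning
def pvBlank (l : String) : Bool := PySem.Str.strip l == ""

-- A's loop body, named
def pvStep (st : List (List (Int × String)) × List (Int × String)) (raw_line : String) :
    List (List (Int × String)) × List (Int × String) :=
  if PySem.Str.strip raw_line = "" then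
    if st.2 ≠ [] then (st.1 ++ [st.2], ([] : List (Int × String))) else st
  else
    let indent_spaces : Int :=
      PySem.Str.len raw_line - ((raw_line.toList.dropWhile (· == ' ')).length : Int)
    let indent_level := PySem.Int.floordiv indent_spaces 4
    (st.1, st.2 ++ [(indent_level, PySem.Str.strip raw_line)])

-- the scripts A's loop still produces from pending script c over the remaining lines
def pvAltGo (c : List (Int × String)) : List String → List (List (Int × String))
  | [] => if c = [] then [] else [c]
  | l :: ls =>
    if pvBlank l then (if c = [] then pvAltGo [] ls else c :: pvAltGo [] ls)
    else pvAltGo (c ++ [pvLineEntry l]) ls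

-- raw segmentation of the lines at blank lines (always non-empty; segments may be empty)
def pvRaw : List String → List (List String)
  | [] => [[]]
  | l :: ls =>
    let r := pvRaw ls
    if pvBlank l then [] :: r else (l :: r.headI) :: r.tail

def pvFilt (r : List (List String)) : List (List (Int × String)) :=
  r.filterMap (fun s => if s = [] then none else some (s.map pvLineEntry))

-- the blank positions (B's first pass), and the boundary tail blank ++ [len]
def pvBlanks (ls : List String) : List Int :=
  (PySem.List.enumerate ls 0).filterMap
    (fun p => if PySem.Str.strip p.2 = "" then some p.1 else none)

def pvT (ls : List String) : List Int := pvBlanks ls ++ [(ls.length : Int)]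

def pvSeg (lines : List String) (p : Int × Int) : Option (List (Int × String)) :=
  let seg := PySem.List.slice lines (some (p.1 + 1)) (some p.2)
  if seg = [] then none else some (seg.map pvLineEntry)

def pvPairs (xs : List Int) : List (Int × Int) := xs.zip xs.tail

lemma pvRaw_ne_nil (ls : List String) : pvRaw ls ≠ [] := by
  cases ls with
  | nil => simp [pvRaw]
  | cons l ls => simp only [pvRaw]; split <;> simp

lemma pvLoopA (ls : List String) (s : List (List (Int × String))) (c : List (Int × String)) :
    (let r := ls.foldl pvStep (s, c); if r.2 ≠ [] then r.1 ++ [r.2] else r.1)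
      = s ++ pvAltGo c ls := by
  induction ls generalizing s c with
  | nil =>
    simp only [List.foldl_nil, pvAltGo]
    by_cases h : c = [] <;> simp [h]
  | cons l ls ih =>
    simp only [List.foldl_cons, pvAltGo]
    by_cases hb : PySem.Str.strip l = ""
    · have hbl : pvBlank l = true := by simp [pvBlank, hb]
      by_cases hc : c = []
      · have h1 : pvStep (s, c) l = (s, c) := by simp [pvStep, hb, hc]
        rw [h1, ih s c, hc]
        simp [hbl]
      · have h1 : pvStep (s, c) l = (s ++ [c], []) := by simp [pvStep, hb, hc]
        rw [h1, ih (s ++ [c]) []]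
        simp [hbl, hc]
    · have hbl : pvBlank l = false := by simp [pvBlank, hb]
      have h1 : pvStep (s, c) l = (s, c ++ [pvLineEntry l]) := by
        simp [pvStep, hb, pvLineEntry]
      rw [h1, ih s (c ++ [pvLineEntry l])]
      simp [hbl]

-- A's remaining loop, described by the raw segmentation
lemma pvAltGo_raw (ls : List String) (c : List (Int × String)) :
    pvAltGo c ls =
      (let h := c ++ ((pvRaw ls).headI).map pvLineEntry;
        if h = [] then [] else [h]) ++ pvFilt ((pvRaw ls).tail) := by
  induction ls generalizing c with
  | nil => simp [pvAltGo, pvRaw, pvFilt]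
  | cons l ls ih =>
    by_cases hb : pvBlank l
    · have hraw : pvRaw (l :: ls) = [] :: pvRaw ls := by simp [pvRaw, hb]
      rw [show pvAltGo c (l :: ls)
            = if pvBlank l then (if c = [] then pvAltGo [] ls else c :: pvAltGo [] ls)
              else pvAltGo (c ++ [pvLineEntry l]) ls from rfl]
      rw [if_pos hb, hraw]
      have hfilt : pvFilt (pvRaw ls) = pvAltGo [] ls := by
        rw [ih []]
        obtain ⟨h0, t0, hht⟩ : ∃ h0 t0, pvRaw ls = h0 :: t0 := by
          cases hx : pvRaw ls with
          | nil => exact absurd hx (pvRaw_ne_nil ls)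
          | cons a b => exact ⟨a, b, rfl⟩
        rw [hht]
        simp only [List.headI, List.tail, List.nil_append, pvFilt, List.filterMap_cons]
        by_cases h0e : h0 = [] <;> simp [h0e]
      by_cases hc : c = [] <;> simp [hc, hfilt]
    · have hraw : pvRaw (l :: ls) = (l :: (pvRaw ls).headI) :: (pvRaw ls).tail := by
        simp [pvRaw, hb]
      rw [show pvAltGo c (l :: ls)
            = if pvBlank l then (if c = [] then pvAltGo [] ls else c :: pvAltGo [] ls)
              else pvAltGo (c ++ [pvLineEntry l]) ls from rfl]
      rw [if_neg (by simp [hb]), ih (c ++ [pvLineEntry l]), hraw]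
      simp

-- index-shift for slices with non-negative bounds
lemma pvSlice_shift (x : String) (xs : List String) (i j : Int) (hi : 0 ≤ i) (hj : 0 ≤ j) :
    PySem.List.slice (x :: xs) (some (i + 1)) (some (j + 1))
      = PySem.List.slice xs (some i) (some j) := by
  rw [PySem.List.slice_toNat _ (by omega) (by omega), PySem.List.slice_toNat _ hi hj]
  have h1 : (i + 1).toNat = i.toNat + 1 := by omega
  have h2 : (j + 1).toNat = j.toNat + 1 := by omega
  rw [h1, h2]
  simp [Nat.add_sub_add_right]

lemma pvEnumFM (ls : List String) (s : Int) :
    (PySem.List.enumerate ls s).filterMap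
        (fun p => if PySem.Str.strip p.2 = "" then some p.1 else none)
      = (pvBlanks ls).map (· + s) := by
  induction ls generalizing s with
  | nil => simp [pvBlanks, PySem.List.enumerate_nil]
  | cons a as ih =>
    by_cases hb : PySem.Str.strip a = "" <;>
      simp [pvBlanks, PySem.List.enumerate_cons, hb, ih (s + 1), ih 1,
        List.map_map, Function.comp_def, add_comm, add_left_comm]

lemma pvBlanks_cons (l : String) (ls : List String) :
    pvBlanks (l :: ls)
      = (if PySem.Str.strip l = "" then [(0 : Int)] else [])
          ++ (pvBlanks ls).map (· + 1) := by
  by_cases hb : PySem.Str.strip l = "" <;>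
    simp [pvBlanks, PySem.List.enumerate_cons, hb, pvEnumFM ls 1]

lemma pvPairs_map_add_one (xs : List Int) :
    pvPairs (xs.map (· + 1)) = (pvPairs xs).map (fun p => (p.1 + 1, p.2 + 1)) := by
  simp only [pvPairs, ← List.map_tail, List.zip_map]
  rfl

lemma pvBlanks_nonneg (ls : List String) : ∀ x ∈ pvBlanks ls, 0 ≤ x := by
  intro x hx
  simp only [pvBlanks, List.mem_filterMap] at hx
  obtain ⟨p, hp, hpx⟩ := hx
  rw [PySem.List.mem_enumerate_iff] at hp
  obtain ⟨k, hk, rfl⟩ := hp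
  split at hpx
  · cases hpx; positivity
  · cases hpx

lemma pvT_nonneg (ls : List String) : ∀ x ∈ pvT ls, 0 ≤ x := by
  intro x hx
  rcases List.mem_append.1 hx with h | h
  · exact pvBlanks_nonneg ls x h
  · simp at h; omega

-- the B-side invariant: first segment and the rest, from the boundary tail
lemma pvB_invariant (ls : List String) :
    PySem.List.slice ls (some 0) (some (pvT ls).headI) = (pvRaw ls).headI
    ∧ (pvPairs (pvT ls)).filterMap (pvSeg ls) = pvFilt ((pvRaw ls).tail) := by
  induction ls with
  | nil =>
    constructor
    · simp [pvT, pvBlanks, PySem.List.enumerate_nil, PySem.List.slice, pvRaw]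
    · simp [pvT, pvBlanks, PySem.List.enumerate_nil, pvPairs, pvRaw, pvFilt]
  | cons l ls ih =>
    obtain ⟨ih1, ih2⟩ := ih
    obtain ⟨c0, r, hT⟩ : ∃ c0 r, pvT ls = c0 :: r := by
      cases hx : pvT ls with
      | nil => exact absurd hx (by simp [pvT])
      | cons a b => exact ⟨a, b, rfl⟩
    have hc0 : 0 ≤ c0 := pvT_nonneg ls c0 (by rw [hT]; exact List.mem_cons_self ..)
    rw [hT] at ih1 ih2
    simp only [List.headI_cons] at ih1
    have hTmem : ∀ x ∈ (c0 :: r : List Int), 0 ≤ x := by rw [← hT]; exact pvT_nonneg ls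
    have hfm_shift : ∀ (y : String),
        ((pvPairs (c0 :: r)).map (fun p => (p.1 + 1, p.2 + 1))).filterMap (pvSeg (y :: ls))
          = (pvPairs (c0 :: r)).filterMap (pvSeg ls) := by
      intro y
      rw [List.filterMap_map]
      apply List.filterMap_congr
      intro p hp
      obtain ⟨hp1, hp2⟩ := List.of_mem_zip hp
      have h1 : 0 ≤ p.1 := hTmem _ hp1
      have h2 : 0 ≤ p.2 := hTmem _ (List.mem_cons_of_mem _ hp2)
      simp only [Function.comp_def, pvSeg]
      rw [show p.1 + 1 + 1 = (p.1 + 1) + 1 from rfl,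
        pvSlice_shift y ls (p.1 + 1) p.2 (by omega) h2]
    by_cases hb : PySem.Str.strip l = ""
    · have hbl : pvBlank l = true := by simp [pvBlank, hb]
      have hTl : pvT (l :: ls) = 0 :: (pvT ls).map (· + 1) := by
        simp [pvT, pvBlanks_cons, hb, List.map_append]
      have hraw : pvRaw (l :: ls) = [] :: pvRaw ls := by simp [pvRaw, hbl]
      constructor
      · rw [hTl, hraw]
        simp [PySem.List.slice]
      · rw [hTl, hraw, hT]
        have : pvPairs (0 :: (c0 :: r).map (· + 1))
            = (0, c0 + 1) :: pvPairs ((c0 :: r).map (· + 1)) := by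
          simp [pvPairs]
        rw [this, List.filterMap_cons, pvPairs_map_add_one, hfm_shift l, ih2]
        have hseg0 : pvSeg (l :: ls) (0, c0 + 1)
            = (fun s => if s = [] then none else some (s.map pvLineEntry))
                ((pvRaw ls).headI) := by
          simp only [pvSeg]
          rw [show (0 : Int) + 1 = 0 + 1 from rfl, pvSlice_shift l ls 0 c0 le_rfl hc0, ih1]
        rw [hseg0]
        obtain ⟨h0, t0, hht⟩ : ∃ h0 t0, pvRaw ls = h0 :: t0 := by
          cases hx : pvRaw ls with
          | nil => exact absurd hx (pvRaw_ne_nil ls)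
          | cons a b => exact ⟨a, b, rfl⟩
        rw [hht]
        simp only [List.headI, List.tail, pvFilt, List.filterMap_cons]
    · have hbl : pvBlank l = false := by simp [pvBlank, hb]
      have hTl : pvT (l :: ls) = (pvT ls).map (· + 1) := by
        simp [pvT, pvBlanks_cons, hb, List.map_append]
      have hraw : pvRaw (l :: ls) = (l :: (pvRaw ls).headI) :: (pvRaw ls).tail := by
        simp [pvRaw, hbl]
      constructor
      · rw [hTl, hT, hraw]
        simp only [List.map_cons, List.headI]
        rw [PySem.List.slice_toNat _ le_rfl (by omega : (0 : Int) ≤ c0 + 1)]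
        rw [PySem.List.slice_toNat _ le_rfl hc0] at ih1
        simp only [Int.toNat_zero, List.drop_zero, Nat.sub_zero] at ih1 ⊢
        have hc1 : (c0 + 1).toNat = c0.toNat + 1 := by omega
        rw [hc1, List.take_succ_cons, ih1]
        rfl
      · rw [hTl, hT, hraw]
        rw [show ((c0 :: r).map (· + 1)) = (c0 + 1) :: r.map (· + 1) from rfl]
        rw [show pvPairs ((c0 + 1) :: r.map (· + 1))
            = pvPairs ((c0 :: r).map (· + 1)) from rfl,
          pvPairs_map_add_one, hfm_shift l, ih2]
        simp

-- B's program equals the filtered raw segmentation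
lemma pvB_eq_filt (ls : List String) :
    ((-1 :: pvT ls).zip (PySem.List.slice (-1 :: pvT ls) (some 1) none)).foldl
      (fun acc p =>
        let seg := PySem.List.slice ls (some (p.1 + 1)) (some p.2)
        if seg ≠ [] then acc ++ [seg.map pvLineEntry] else acc) []
      = pvFilt (pvRaw ls) := by
  obtain ⟨ih1, ih2⟩ := pvB_invariant ls
  obtain ⟨c0, r, hT⟩ : ∃ c0 r, pvT ls = c0 :: r := by
    cases hx : pvT ls with
    | nil => exact absurd hx (by simp [pvT])
    | cons a b => exact ⟨a, b, rfl⟩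
  rw [hT] at ih1 ih2
  simp only [List.headI_cons] at ih1
  have hfold : ∀ (ps : List (Int × Int)) (acc : List (List (Int × String))),
      ps.foldl (fun acc p =>
        let seg := PySem.List.slice ls (some (p.1 + 1)) (some p.2)
        if seg ≠ [] then acc ++ [seg.map pvLineEntry] else acc) acc
        = acc ++ ps.filterMap (pvSeg ls) := by
    intro ps
    induction ps with
    | nil => simp
    | cons p ps ihp =>
      intro acc
      rw [List.foldl_cons, ihp]
      by_cases hseg : PySem.List.slice ls (some (p.1 + 1)) (some p.2) = [] <;>
        simp [pvSeg, hseg]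
  rw [PySem.List.slice_from_one, hfold, hT]
  have hzip : (-1 :: c0 :: r).zip (-1 :: c0 :: r).tail = (-1, c0) :: pvPairs (c0 :: r) := by
    simp [pvPairs]
  rw [hzip, List.filterMap_cons, ih2]
  have hseg0 : pvSeg ls (-1, c0)
      = (fun s => if s = [] then none else some (s.map pvLineEntry)) ((pvRaw ls).headI) := by
    simp only [pvSeg]
    rw [show (-1 : Int) + 1 = 0 from rfl, ih1]
  rw [hseg0]
  obtain ⟨h0, t0, hht⟩ : ∃ h0 t0, pvRaw ls = h0 :: t0 := by
    cases hx : pvRaw ls with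
    | nil => exact absurd hx (pvRaw_ne_nil ls)
    | cons a b => exact ⟨a, b, rfl⟩
  rw [hht]
  simp only [List.headI, List.tail, pvFilt, List.filterMap_cons]
  by_cases h0e : h0 = [] <;> simp [h0e]

-- ===== VERDICT (by name: the statement is the Claim_ definition above) =====
theorem split_scripts_spec : Claim_equal_split_scripts := by
  intro content _
  unfold Spec_split_scripts
  have hA : split_scripts content = [] ++ pvAltGo [] (PySem.Str.splitlines content) := by
    rw [← pvLoopA (PySem.Str.splitlines content) [] []]
    rfl
  have hAfilt : pvAltGo ([] : List (Int × String)) (PySem.Str.splitlines content)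
      = pvFilt (pvRaw (PySem.Str.splitlines content)) := by
    rw [pvAltGo_raw]
    obtain ⟨h0, t0, hht⟩ : ∃ h0 t0, pvRaw (PySem.Str.splitlines content) = h0 :: t0 := by
      cases hx : pvRaw (PySem.Str.splitlines content) with
      | nil => exact absurd hx (pvRaw_ne_nil _)
      | cons a b => exact ⟨a, b, rfl⟩
    rw [hht]
    simp only [List.headI, List.tail, List.nil_append, pvFilt, List.filterMap_cons]
    by_cases h0e : h0 = [] <;> simp [h0e]
  rw [hA, List.nil_append, hAfilt, ← pvB_eq_filt]
  rfl
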